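-- pv_equiv track=rewrite | github.com/Ghadaala/descending_sorted_triplet_brute_force_algorithm | sorted sublist triplets.py | find_descending_sorted_triplet
-- ===== SOURCE A (Python) =====
-- def find_descending_sorted_triplet (arr):
--     # Get the length of the array
--     n = len(arr)
--
--     # Traverse through all possible triplets and check if they form a decreasing subsequence
-- #most-outer loop for the maximum element
--     for l in range(n-2):
-- #middle loop to the right next  element
--         for m in range(l+1, n-1):
-- #inner loop for the minimum element
--             for q in range(m+1, n):
--                 if arr[l] > arr[m] > arr[q]:
-- #return the triplets
--                     return (arr[l], arr[m], arr[q])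
-- #return None if there are no triplets
--
--     return None
-- ===== SOURCE B (Python) =====
-- def find_descending_sorted_triplet(arr):
--     # O(n): right-to-left pass computes, for each position, whether it can be a
--     # middle element (some later element is smaller) and the minimum value of any
--     # valid middle at or after that position; then one scan finds the answer's l,
--     # and two single find-first scans recover m and q.
--     n = len(arr)
--     good = [False] * n
--     gmin = [None] * (n + 1)   # gmin[i] = min value of a valid middle at index >= i
--     smin = None               # min of arr[i:]
--     for i in range(n - 1, -1, -1):
--         g = gmin[i + 1]
--         if smin is not None and smin < arr[i]:
--             good[i] = True
--             if g is None or arr[i] < g: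
--                 g = arr[i]
--         gmin[i] = g
--         if smin is None or arr[i] < smin:
--             smin = arr[i]
--     for l in range(n):
--         g = gmin[l + 1]
--         if g is not None and g < arr[l]:
--             m = next(i for i in range(l + 1, n) if good[i] and arr[i] < arr[l])
--             q = next(i for i in range(m + 1, n) if arr[i] < arr[m])
--             return (arr[l], arr[m], arr[q])
--     return None
-- ===== Notes on version B (the rewrite author's own statement) =====
-- stated objective: faster
-- what changed: Replaces A's O(n^3) triple nested scan over all index triplets by a single right-to-left pass that marks valid middle elements and keeps a suffix minimum over them, then one left scan to find the answer's first index and two find-first scans to recover the middle and minimum indices.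
import Mathlib
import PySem

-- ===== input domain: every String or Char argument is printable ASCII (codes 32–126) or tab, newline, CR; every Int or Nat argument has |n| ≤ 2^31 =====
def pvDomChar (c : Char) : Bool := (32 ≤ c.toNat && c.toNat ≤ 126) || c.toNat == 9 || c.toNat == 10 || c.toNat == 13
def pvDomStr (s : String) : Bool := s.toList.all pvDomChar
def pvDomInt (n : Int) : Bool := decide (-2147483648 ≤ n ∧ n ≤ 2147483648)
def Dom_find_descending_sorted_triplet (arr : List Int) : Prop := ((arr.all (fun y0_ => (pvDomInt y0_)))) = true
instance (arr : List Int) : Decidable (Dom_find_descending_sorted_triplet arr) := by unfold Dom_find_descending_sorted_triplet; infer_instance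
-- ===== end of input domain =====

-- B replaces A's O(n^3) triple nested scan by a single right-to-left pass (valid-middle
-- flags and a suffix minimum over valid middles) followed by one left scan and two
-- find-first scans; same return value everywhere (both are total).

-- ===== PORT A =====
-- Triple nested `for ... return` loops become nested findSome? over the same ranges
-- (Python ranges are over nonnegative ints; Nat subtraction matches Python's empty range).
def find_descending_sorted_triplet (arr : List Int) : Option (List Int) :=
  let n := arr.length
  (List.range' 0 (n - 2)).findSome? fun l =>
    (List.range' (l + 1) (n - 1 - (l + 1))).findSome? fun m =>
      (List.range' (m + 1) (n - (m + 1))).findSome? fun q =>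
        if arr.getD l 0 > arr.getD m 0 ∧ arr.getD m 0 > arr.getD q 0 then
          some [arr.getD l 0, arr.getD m 0, arr.getD q 0]
        else none

-- ===== PORT B =====
-- Source B's right-to-left loop filling good[], gmin[] and running smin, as a structural
-- recursion producing (gmin list of length n+1, good list of length n, smin).
def pvPass1 : List Int → List (Option Int) × List Bool × Option Int
  | [] => ([none], [], none)
  | a :: rest =>
    let r := pvPass1 rest
    let gm := r.1
    let gd := r.2.1
    let sm := r.2.2
    let isGood : Bool := match sm with | some s => decide (s < a) | none => false
    let g1 := gm.headD none
    let g : Option Int :=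
      if isGood then
        (match g1 with | none => some a | some v => some (if a < v then a else v))
      else g1
    let sm' : Option Int := match sm with | none => some a | some s => some (if a < s then a else s)
    (g :: gm, isGood :: gd, sm')

-- Source B's `for l` loop with its first-match `next(...)` scans for m and q; `next` is
-- guaranteed to find an element when reached (proved below), so Option.bind is exact.
def find_descending_sorted_triplet_alt (arr : List Int) : Option (List Int) :=
  let n := arr.length
  let p := pvPass1 arr
  (((List.range' 0 n).find? fun l =>
      match p.1.getD (l + 1) none with
      | some g => decide (g < arr.getD l 0)
      | none => false).bind fun l =>
    ((List.range' (l + 1) (n - (l + 1))).find? fun m =>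
        p.2.1.getD m false && decide (arr.getD m 0 < arr.getD l 0)).bind fun m =>
      ((List.range' (m + 1) (n - (m + 1))).find? fun q =>
          decide (arr.getD q 0 < arr.getD m 0)).map fun q =>
        [arr.getD l 0, arr.getD m 0, arr.getD q 0])

-- ===== PRECONDITION & SPEC =====
def Spec_find_descending_sorted_triplet (arr : List Int) (out : Option (List Int)) : Prop := out = find_descending_sorted_triplet_alt arr
instance (arr : List Int) (out : Option (List Int)) : Decidable (Spec_find_descending_sorted_triplet arr out) := by unfold Spec_find_descending_sorted_triplet; infer_instance

-- ===== CLAIM (what is proved, stated in full; the proofs are below) =====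
def Claim_equal_find_descending_sorted_triplet : Prop := ∀ (arr : List Int), Dom_find_descending_sorted_triplet arr → Spec_find_descending_sorted_triplet arr (find_descending_sorted_triplet arr)

-- ===== LEMMAS AND PROOFS =====

-- value at index i (all indices used are in range, so the default is never returned)
def gv (arr : List Int) (i : Nat) : Int := arr.getD i 0

-- first q > m with arr[q] < arr[m]
def qf (arr : List Int) (m : Nat) : Option Nat :=
  (List.range' (m + 1) (arr.length - (m + 1))).find? fun q => decide (gv arr q < gv arr m)

-- m is a valid middle element
def gd (arr : List Int) (m : Nat) : Bool := (qf arr m).isSome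

-- first valid middle m > l with arr[m] < arr[l]
def mf (arr : List Int) (l : Nat) : Option Nat :=
  (List.range' (l + 1) (arr.length - (l + 1))).find? fun m =>
    gd arr m && decide (gv arr m < gv arr l)

-- first l admitting a full triplet
def lf (arr : List Int) : Option Nat := (List.range' 0 arr.length).find? fun l => (mf arr l).isSome

-- common normal form of both ports
def chain (arr : List Int) : Option (List Int) :=
  (lf arr).bind fun l => (mf arr l).bind fun m => (qf arr m).map fun q =>
    [gv arr l, gv arr m, gv arr q]

-- min over valid middles at indices ≥ i
def gmins (arr : List Int) (i : Nat) : Option Int :=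
  (((List.range' i (arr.length - i)).filter (fun m => gd arr m)).map (gv arr)).min?

lemma findSome?_none {α β : Type} (l : List α) :
    l.findSome? (fun _ => (none : Option β)) = none := by
  induction l with
  | nil => rfl
  | cons a t ih => simpa [List.findSome?_cons] using ih

lemma findSome?_guard {α β : Type} (l : List α) (p : α → Bool) (h : α → β) :
    l.findSome? (fun x => if p x then some (h x) else none) = (l.find? p).map h := by
  induction l with
  | nil => rfl
  | cons a t ih =>
    by_cases hpa : p a <;> simp [List.find?_cons, hpa, ih]

lemma find?_congr_mem {α : Type} {l : List α} {p q : α → Bool} (h : ∀ x ∈ l, p x = q x) :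
    l.find? p = l.find? q := by
  induction l with
  | nil => rfl
  | cons a t ih =>
    rw [List.find?_cons, List.find?_cons, h a (by simp)]
    cases hqa : q a with
    | true => rfl
    | false => exact ih fun x hx => h x (by simp [hx])

lemma range'_shift (s k : Nat) : List.range' (s + 1) k = (List.range' s k).map (· + 1) := by
  rw [List.range'_eq_map_range, List.range'_eq_map_range, List.map_map]
  apply List.map_congr_left
  intro x _
  simp
  omega

lemma option_map_eq {α β : Type} (o : Option α) (h : α → β) (d : α) :
    o.map h = if o.isSome then some (h (o.getD d)) else none := by
  cases o <;> simp

lemma headD_eq_getD {α : Type} (l : List α) (d : α) : l.headD d = l.getD 0 d := by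
  cases l <;> rfl

lemma gv_cons_succ (a : Int) (arr : List Int) (i : Nat) : gv (a :: arr) (i + 1) = gv arr i := by
  simp [gv]

lemma qf_cons (a : Int) (arr : List Int) (m : Nat) :
    qf (a :: arr) (m + 1) = (qf arr m).map (· + 1) := by
  unfold qf
  have hlen : (a :: arr).length - (m + 1 + 1) = arr.length - (m + 1) := by
    simp [List.length_cons]
  rw [hlen, range'_shift, List.find?_map]
  congr 1

lemma gd_cons (a : Int) (arr : List Int) (m : Nat) : gd (a :: arr) (m + 1) = gd arr m := by
  simp [gd, qf_cons]

lemma gd_zero (a : Int) (arr : List Int) :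
    gd (a :: arr) 0 = (match arr.min? with | some s => decide (s < a) | none => false) := by
  have h1 : qf (a :: arr) 0
      = ((List.range' 0 arr.length).find? fun q => decide (gv arr q < a)).map (· + 1) := by
    unfold qf
    have hlen : (a :: arr).length - (0 + 1) = arr.length := by simp
    rw [hlen, range'_shift, List.find?_map]
    congr 1
  have h2 : (qf (a :: arr) 0).isSome = true ↔ ∃ x ∈ arr, x < a := by
    rw [h1]
    simp only [Option.isSome_map, List.find?_isSome]
    constructor
    · rintro ⟨q, hq, hlt⟩
      rw [List.mem_range'] at hq
      obtain ⟨i, hi, rfl⟩ := hq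
      refine ⟨gv arr (0 + 1 * i), ?_, by simpa using hlt⟩
      have : 0 + 1 * i < arr.length := by omega
      simp only [gv, List.getD_eq_getElem?_getD]
      rw [List.getElem?_eq_getElem this]
      exact List.getElem_mem _
    · rintro ⟨x, hx, hlt⟩
      obtain ⟨i, hi, rfl⟩ := List.mem_iff_getElem.mp hx
      refine ⟨i, ?_, ?_⟩
      · rw [List.mem_range']; exact ⟨i, hi, by omega⟩
      · simp only [gv, List.getD_eq_getElem?_getD]
        rw [List.getElem?_eq_getElem hi]
        simpa using hlt
  unfold gd
  cases hmin : arr.min? with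
  | none =>
    have : arr = [] := List.min?_eq_none_iff.mp hmin
    subst this
    simp [qf]
  | some s =>
    obtain ⟨hmem, hle⟩ := List.min?_eq_some_iff.mp hmin
    rw [Bool.eq_iff_iff]
    simp only [h2, decide_eq_true_eq]
    constructor
    · rintro ⟨x, hx, hxa⟩
      exact lt_of_le_of_lt (hle x hx) hxa
    · intro h
      exact ⟨s, hmem, h⟩

lemma gd_last (arr : List Int) (m : Nat) (h : arr.length ≤ m + 1) : gd arr m = false := by
  simp [gd, qf, Nat.sub_eq_zero_of_le h]

lemma mf_last (arr : List Int) (l : Nat) (h : arr.length ≤ l + 2) : mf arr l = none := by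
  unfold mf
  apply List.find?_eq_none.mpr
  intro m hm
  rw [List.mem_range'] at hm
  obtain ⟨i, hi, rfl⟩ := hm
  rw [gd_last arr _ (by omega)]
  simp

lemma gmins_cons (a : Int) (arr : List Int) (i : Nat) :
    gmins (a :: arr) (i + 1) = gmins arr i := by
  unfold gmins
  have hlen : (a :: arr).length - (i + 1) = arr.length - i := by simp
  rw [hlen, range'_shift, List.filter_map, List.map_map]
  congr 1
  rw [List.filter_congr (fun q _ => by
    show (fun m => gd (a :: arr) m) ((fun x => x + 1) q) = gd arr q
    simp [gd_cons])]
  apply List.map_congr_left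
  intro q _
  simp [Function.comp, gv_cons_succ]

lemma pass1_smin (arr : List Int) : (pvPass1 arr).2.2 = arr.min? := by
  induction arr with
  | nil => rfl
  | cons a rest ih =>
    simp only [pvPass1, ih, List.min?_cons]
    cases hmin : rest.min? with
    | none => simp
    | some s =>
      simp only [Option.elim]
      congr 1
      rcases lt_trichotomy a s with h | h | h <;> simp [min_def, h] <;> omega

lemma pass1_good (arr : List Int) (m : Nat) (h : m < arr.length) :
    (pvPass1 arr).2.1.getD m false = gd arr m := by
  induction arr generalizing m with
  | nil => simp at h
  | cons a rest ih =>
    cases m with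
    | zero =>
      simp only [pvPass1, List.getD_cons_zero, pass1_smin, gd_zero]
    | succ m =>
      simp only [pvPass1, List.getD_cons_succ, gd_cons]
      exact ih m (by simpa using h)

lemma gmins_zero (a : Int) (arr : List Int) :
    gmins (a :: arr) 0 =
      if gd (a :: arr) 0 then
        (match gmins (a :: arr) 1 with
          | none => some a
          | some v => some (if a < v then a else v))
      else gmins (a :: arr) 1 := by
  unfold gmins
  have h0 : (a :: arr).length - 0 = arr.length + 1 := by simp
  have h1 : (a :: arr).length - 1 = arr.length := by simp
  rw [h0, h1, List.range'_succ]
  by_cases hg : gd (a :: arr) 0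
  · rw [List.filter_cons_of_pos (by simpa using hg), if_pos hg]
    have hgv0 : gv (a :: arr) 0 = a := rfl
    rw [List.map_cons, hgv0, List.min?_cons]
    cases hmin : ((List.filter (fun m => gd (a :: arr) m) (List.range' 1 arr.length)).map
        (gv (a :: arr))).min? with
    | none => simp
    | some v =>
      simp only [Option.elim]
      congr 1
      rcases lt_trichotomy a v with h | h | h <;> simp [min_def, h] <;> omega
  · rw [List.filter_cons_of_neg (by simpa using hg), if_neg hg]

lemma pass1_gmin (arr : List Int) (i : Nat) (h : i ≤ arr.length) :
    (pvPass1 arr).1.getD i none = gmins arr i := by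
  induction arr generalizing i with
  | nil =>
    simp only [List.length_nil, Nat.le_zero] at h
    subst h
    rfl
  | cons a rest ih =>
    cases i with
    | succ i =>
      simp only [pvPass1, List.getD_cons_succ, gmins_cons]
      exact ih i (by simpa using h)
    | zero =>
      simp only [pvPass1, List.getD_cons_zero]
      rw [headD_eq_getD, ih 0 (by omega), pass1_smin, gmins_zero, ← gd_zero a rest,
        gmins_cons]

lemma gmins_link (arr : List Int) (l : Nat) :
    (match gmins arr (l + 1) with | some g => decide (g < gv arr l) | none => false)
      = (mf arr l).isSome := by
  unfold gmins mf
  cases hS : (((List.range' (l + 1) (arr.length - (l + 1))).filter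
      (fun m => gd arr m)).map (gv arr)).min? with
  | none =>
    have hnil := List.min?_eq_none_iff.mp hS
    rw [List.map_eq_nil_iff] at hnil
    symm
    rw [Bool.eq_false_iff]
    intro hsome
    rw [List.find?_isSome] at hsome
    obtain ⟨m, hm, hpm⟩ := hsome
    have : m ∈ ((List.range' (l + 1) (arr.length - (l + 1))).filter (fun m => gd arr m)) := by
      rw [List.mem_filter]
      have := Bool.and_eq_true_iff.mp hpm
      exact ⟨hm, this.1⟩
    rw [hnil] at this
    cases this
  | some g =>
    obtain ⟨hmem, hle⟩ := List.min?_eq_some_iff.mp hS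
    rw [List.mem_map] at hmem
    obtain ⟨m, hmf, rfl⟩ := hmem
    rw [List.mem_filter] at hmf
    obtain ⟨hmr, hgd⟩ := hmf
    rw [Bool.eq_iff_iff]
    simp only [List.find?_isSome, decide_eq_true_eq, Bool.and_eq_true]
    constructor
    · intro hlt
      exact ⟨m, hmr, hgd, hlt⟩
    · rintro ⟨m', hm'r, hgd', hlt'⟩
      have : gv arr m ≤ gv arr m' := by
        apply hle
        rw [List.mem_map]
        exact ⟨m', List.mem_filter.mpr ⟨hm'r, hgd'⟩, rfl⟩
      omega

lemma innerA (arr : List Int) (l m : Nat) :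
    ((List.range' (m + 1) (arr.length - (m + 1))).findSome? fun q =>
        if arr.getD l 0 > arr.getD m 0 ∧ arr.getD m 0 > arr.getD q 0 then
          some [arr.getD l 0, arr.getD m 0, arr.getD q 0]
        else none)
      = if gd arr m && decide (gv arr m < gv arr l) then
          some [gv arr l, gv arr m, gv arr ((qf arr m).getD 0)]
        else none := by
  by_cases hlm : arr.getD m 0 < arr.getD l 0
  · have hfun : (fun q => if arr.getD l 0 > arr.getD m 0 ∧ arr.getD m 0 > arr.getD q 0 then
          some [arr.getD l 0, arr.getD m 0, arr.getD q 0] else none)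
        = fun q => if decide (gv arr q < gv arr m) then
            some [gv arr l, gv arr m, gv arr q] else none := by
      funext q
      by_cases hq : arr.getD q 0 < arr.getD m 0
      · rw [if_pos ⟨hlm, hq⟩,
          if_pos (show decide (gv arr q < gv arr m) = true from decide_eq_true hq)]
        rfl
      · rw [if_neg (fun hcon => hq hcon.2),
          if_neg (show ¬(decide (gv arr q < gv arr m) = true) from by
            simp only [decide_eq_true_eq]
            exact hq)]
    rw [hfun, findSome?_guard]
    have hqf : (List.range' (m + 1) (arr.length - (m + 1))).find?
        (fun q => decide (gv arr q < gv arr m)) = qf arr m := rfl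
    rw [hqf]
    have hd : decide (gv arr m < gv arr l) = true := decide_eq_true hlm
    cases hq : qf arr m with
    | none => simp [gd, hq]
    | some q => simp [gd, hq, hd]
  · have hfun : (fun q => if arr.getD l 0 > arr.getD m 0 ∧ arr.getD m 0 > arr.getD q 0 then
          some [arr.getD l 0, arr.getD m 0, arr.getD q 0] else none)
        = fun _ => (none : Option (List Int)) := by
      funext q
      exact if_neg (fun hcon => hlm hcon.1)
    rw [hfun, findSome?_none]
    have hd : decide (gv arr m < gv arr l) = false := decide_eq_false hlm
    simp [hd]

lemma mfind_short (arr : List Int) (l : Nat) :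
    (List.range' (l + 1) (arr.length - 1 - (l + 1))).find?
        (fun m => gd arr m && decide (gv arr m < gv arr l)) = mf arr l := by
  unfold mf
  by_cases h : l + 2 ≤ arr.length
  · have h1 : arr.length - (l + 1) = (arr.length - 1 - (l + 1)) + 1 := by omega
    rw [h1, List.range'_concat, List.find?_append]
    have hidx : arr.length - 1 = l + 1 + (arr.length - 1 - (l + 1)) := by omega
    have hlast : gd arr (l + 1 + (arr.length - 1 - (l + 1))) = false := by
      rw [← hidx]
      exact gd_last arr _ (by omega)
    simp [hlast]
  · have h1 : arr.length - (l + 1) = arr.length - 1 - (l + 1) := by omega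
    rw [h1]

lemma lfind_short (arr : List Int) :
    (List.range' 0 (arr.length - 2)).find? (fun l => (mf arr l).isSome) = lf arr := by
  unfold lf
  by_cases h : 2 ≤ arr.length
  · have h1 : arr.length = (arr.length - 2) + 2 := by omega
    have h2 : List.range' 0 arr.length
        = List.range' 0 (arr.length - 2) ++ List.range' (0 + 1 * (arr.length - 2)) 2 := by
      conv_lhs => rw [h1]
      rw [← List.range'_append]
    rw [h2, List.find?_append]
    have hnone : (List.range' (0 + 1 * (arr.length - 2)) 2).find?
        (fun l => (mf arr l).isSome) = none := by
      apply List.find?_eq_none.mpr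
      intro l hl
      rw [List.mem_range'] at hl
      obtain ⟨i, hi, rfl⟩ := hl
      rw [mf_last arr _ (by omega)]
      simp
    rw [hnone, Option.or_none]
  · have h1 : arr.length - 2 = 0 := by omega
    rw [h1]
    symm
    apply List.find?_eq_none.mpr
    intro l hl
    rw [List.mem_range'] at hl
    obtain ⟨i, hi, rfl⟩ := hl
    rw [mf_last arr _ (by omega)]
    simp

lemma A_eq_chain (arr : List Int) : find_descending_sorted_triplet arr = chain arr := by
  have hA : find_descending_sorted_triplet arr
      = (List.range' 0 (arr.length - 2)).findSome? fun l =>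
          (List.range' (l + 1) (arr.length - 1 - (l + 1))).findSome? fun m =>
            (List.range' (m + 1) (arr.length - (m + 1))).findSome? fun q =>
              if arr.getD l 0 > arr.getD m 0 ∧ arr.getD m 0 > arr.getD q 0 then
                some [arr.getD l 0, arr.getD m 0, arr.getD q 0]
              else none := rfl
  rw [hA]
  have hbody : (fun l => (List.range' (l + 1) (arr.length - 1 - (l + 1))).findSome? fun m =>
        (List.range' (m + 1) (arr.length - (m + 1))).findSome? fun q =>
          if arr.getD l 0 > arr.getD m 0 ∧ arr.getD m 0 > arr.getD q 0 then
            some [arr.getD l 0, arr.getD m 0, arr.getD q 0]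
          else none)
      = fun l => if (mf arr l).isSome then
          some [gv arr l, gv arr ((mf arr l).getD 0),
            gv arr ((qf arr ((mf arr l).getD 0)).getD 0)]
        else none := by
    funext l
    have h1 : (fun m => (List.range' (m + 1) (arr.length - (m + 1))).findSome? fun q =>
          if arr.getD l 0 > arr.getD m 0 ∧ arr.getD m 0 > arr.getD q 0 then
            some [arr.getD l 0, arr.getD m 0, arr.getD q 0]
          else none)
        = fun m => if gd arr m && decide (gv arr m < gv arr l) then
            some [gv arr l, gv arr m, gv arr ((qf arr m).getD 0)]
          else none := funext fun m => innerA arr l m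
    rw [h1, findSome?_guard, mfind_short,
      option_map_eq (mf arr l) (fun m => [gv arr l, gv arr m, gv arr ((qf arr m).getD 0)]) 0]
  rw [hbody, findSome?_guard, lfind_short]
  cases hl : lf arr with
  | none => simp [chain, hl]
  | some l =>
    have hpl := List.find?_some hl
    rw [Option.isSome_iff_exists] at hpl
    obtain ⟨m, hm⟩ := hpl
    have hpm := List.find?_some hm
    rw [Bool.and_eq_true_iff] at hpm
    obtain ⟨hgd, _⟩ := hpm
    unfold gd at hgd
    rw [Option.isSome_iff_exists] at hgd
    obtain ⟨q, hq⟩ := hgd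
    simp [chain, hl, hm, hq]

lemma B_eq_chain (arr : List Int) : find_descending_sorted_triplet_alt arr = chain arr := by
  have hB : find_descending_sorted_triplet_alt arr
      = (((List.range' 0 arr.length).find? fun l =>
            match (pvPass1 arr).1.getD (l + 1) none with
            | some g => decide (g < arr.getD l 0)
            | none => false).bind fun l =>
          ((List.range' (l + 1) (arr.length - (l + 1))).find? fun m =>
              (pvPass1 arr).2.1.getD m false && decide (arr.getD m 0 < arr.getD l 0)).bind fun m =>
            ((List.range' (m + 1) (arr.length - (m + 1))).find? fun q =>
                decide (arr.getD q 0 < arr.getD m 0)).map fun q =>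
              [arr.getD l 0, arr.getD m 0, arr.getD q 0]) := rfl
  rw [hB]
  unfold chain lf
  have hlpred : ∀ l ∈ List.range' 0 arr.length,
      (match (pvPass1 arr).1.getD (l + 1) none with
        | some g => decide (g < arr.getD l 0)
        | none => false)
        = (mf arr l).isSome := by
    intro l hl
    rw [List.mem_range'] at hl
    obtain ⟨i, hi, rfl⟩ := hl
    rw [pass1_gmin arr _ (by omega)]
    exact gmins_link arr (0 + 1 * i)
  rw [find?_congr_mem hlpred]
  cases hlf : (List.range' 0 arr.length).find? (fun l => (mf arr l).isSome) with
  | none => rfl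
  | some l =>
    simp only [Option.bind_some]
    have hmpred : ∀ m ∈ List.range' (l + 1) (arr.length - (l + 1)),
        ((pvPass1 arr).2.1.getD m false && decide (arr.getD m 0 < arr.getD l 0))
          = (gd arr m && decide (gv arr m < gv arr l)) := by
      intro m hm
      rw [List.mem_range'] at hm
      obtain ⟨i, hi, rfl⟩ := hm
      rw [pass1_good arr _ (by omega)]
      rfl
    rw [find?_congr_mem hmpred]
    rfl

-- ===== VERDICT (by name: the statement is the Claim_ definition above) =====
theorem find_descending_sorted_triplet_spec : Claim_equal_find_descending_sorted_triplet := by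
  intro arr _
  unfold Spec_find_descending_sorted_triplet
  rw [A_eq_chain, B_eq_chain]
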